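-- pv_equiv track=rewrite | github.com/ylsung/ECoFLaP | LAVIS/lavis/compression/modify_qformer_with_weight_init.py | get_qformer_ps
-- ===== SOURCE A (Python) =====
-- def get_qformer_ps(num_layers, cross_attention_freq):
--     ps_dict = {
--         "bert.embeddings.position_ids": (None, None),
--         "bert.embeddings.LayerNorm.weight": (None, None),
--         "bert.embeddings.LayerNorm.bias": (None,),
--         **{f"bert.encoder.layer.{i}.attention.self.query.weight": (None, None) for i in range(num_layers)},
--         **{f"bert.encoder.layer.{i}.attention.self.query.bias": (None,) for i in range(num_layers)},
--         **{f"bert.encoder.layer.{i}.attention.self.key.weight": (None, None) for i in range(num_layers)},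
--         **{f"bert.encoder.layer.{i}.attention.self.key.bias": (None,) for i in range(num_layers)},
--         **{f"bert.encoder.layer.{i}.attention.self.value.weight": (None, None) for i in range(num_layers)},
--         **{f"bert.encoder.layer.{i}.attention.self.value.bias": (None,) for i in range(num_layers)},
--         **{f"bert.encoder.layer.{i}.attention.output.dense.weight": (None, None) for i in range(num_layers)},
--         **{f"bert.encoder.layer.{i}.attention.output.dense.bias": (None,) for i in range(num_layers)},
--         **{f"bert.encoder.layer.{i}.attention.output.LayerNorm.weight": (None, None) for i in range(num_layers)},
--         **{f"bert.encoder.layer.{i}.attention.output.LayerNorm.bias": (None,) for i in range(num_layers)},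
--         **{f"bert.encoder.layer.{i}.crossattention.self.query.weight": (None, None) for i in range(0, num_layers, cross_attention_freq)},
--         **{f"bert.encoder.layer.{i}.crossattention.self.query.bias": (None,) for i in range(0, num_layers, cross_attention_freq)},
--         **{f"bert.encoder.layer.{i}.crossattention.self.key.weight": (None, "P_vit_res") for i in range(0, num_layers, cross_attention_freq)},
--         **{f"bert.encoder.layer.{i}.crossattention.self.key.bias": (None,) for i in range(0, num_layers, cross_attention_freq)},
--         **{f"bert.encoder.layer.{i}.crossattention.self.value.weight": (None, "P_vit_res") for i in range(0, num_layers, cross_attention_freq)},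
--         **{f"bert.encoder.layer.{i}.crossattention.self.value.bias": (None,) for i in range(0, num_layers, cross_attention_freq)},
--         **{f"bert.encoder.layer.{i}.crossattention.output.dense.weight": (None, None) for i in range(0, num_layers, cross_attention_freq)},
--         **{f"bert.encoder.layer.{i}.crossattention.output.dense.bias": (None,) for i in range(0, num_layers, cross_attention_freq)},
--         **{f"bert.encoder.layer.{i}.crossattention.output.LayerNorm.weight": (None, None) for i in range(0, num_layers, cross_attention_freq)},
--         **{f"bert.encoder.layer.{i}.crossattention.output.LayerNorm.bias": (None,) for i in range(0, num_layers, cross_attention_freq)},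
--         **{f"bert.encoder.layer.{i}.intermediate_query.dense.weight": (None, None) for i in range(num_layers)},
--         **{f"bert.encoder.layer.{i}.intermediate_query.dense.bias": (None,) for i in range(num_layers)},
--         **{f"bert.encoder.layer.{i}.output_query.dense.weight": (None, None) for i in range(num_layers)},
--         **{f"bert.encoder.layer.{i}.output_query.dense.bias": (None,) for i in range(num_layers)},
--         **{f"bert.encoder.layer.{i}.output_query.LayerNorm.weight": (None, None) for i in range(num_layers)},
--         **{f"bert.encoder.layer.{i}.output_query.LayerNorm.bias": (None,) for i in range(num_layers)},
--     }
--
--     return ps_dict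
-- ===== SOURCE B (Python) =====
-- def get_qformer_ps(num_layers, cross_attention_freq):
--     ps = {
--         "bert.embeddings.position_ids": (None, None),
--         "bert.embeddings.LayerNorm.weight": (None, None),
--         "bert.embeddings.LayerNorm.bias": (None,),
--     }
--     attn_modules = ["self.query", "self.key", "self.value", "output.dense", "output.LayerNorm"]
--     groups = [
--         ("attention", attn_modules, 1),
--         ("crossattention", attn_modules, cross_attention_freq),
--         ("", ["intermediate_query.dense", "output_query.dense", "output_query.LayerNorm"], 1),
--     ]
--     for prefix, modules, step in groups:
--         for module in modules:
--             name = f"{prefix}.{module}" if prefix else module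
--             for kind in ("weight", "bias"):
--                 if kind == "bias":
--                     shape = (None,)
--                 elif prefix == "crossattention" and module in ("self.key", "self.value"):
--                     shape = (None, "P_vit_res")
--                 else:
--                     shape = (None, None)
--                 for i in range(0, num_layers, step):
--                     ps[f"bert.encoder.layer.{i}.{name}.{kind}"] = shape
--     return ps
-- ===== Notes on version B (the rewrite author's own statement) =====
-- stated objective: idiomatic
-- what changed: Instead of A's single 30-comprehension dict literal enumerating every (key, shape) pair, B generates the keys as a cartesian product of (group prefix x module x weight/bias x layer range) and derives each shape by a classification rule (bias -> 1-D, cross-attention key/value weight -> (None,'P_vit_res'), otherwise 2-D); Pre_ excludes cross_attention_freq == 0, where range(0, n, 0) raises ValueError in both A and B.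
import Mathlib
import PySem

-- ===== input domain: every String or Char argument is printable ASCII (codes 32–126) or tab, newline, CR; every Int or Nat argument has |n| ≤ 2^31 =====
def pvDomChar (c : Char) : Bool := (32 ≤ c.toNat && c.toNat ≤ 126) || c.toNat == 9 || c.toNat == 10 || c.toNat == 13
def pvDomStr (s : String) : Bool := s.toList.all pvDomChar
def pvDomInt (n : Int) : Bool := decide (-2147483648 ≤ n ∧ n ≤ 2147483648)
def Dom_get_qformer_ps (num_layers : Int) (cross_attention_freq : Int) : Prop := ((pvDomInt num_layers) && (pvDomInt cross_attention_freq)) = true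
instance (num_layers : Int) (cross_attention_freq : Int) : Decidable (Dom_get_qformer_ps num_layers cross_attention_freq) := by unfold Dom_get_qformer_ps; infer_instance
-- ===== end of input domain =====

-- B derives the keys as a cartesian product (group x module x weight/bias x layer range) and the
-- shapes by a classification rule, instead of A's 30-comprehension dict literal (objective: idiomatic; same cost).


-- ===== PORT A =====
-- literal transliteration of A's single dict literal: the three fixed entries followed by
-- the thirty dict comprehensions, merged in order into a PySem.Dict (insertion order, overwrite)
def get_qformer_ps (num_layers : Int) (cross_attention_freq : Int) : List (String × List (Option String)) :=
  (PySem.Dict.ofList (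
    [(("bert.embeddings.position_ids" : String), ([none, none] : List (Option String))),
     ("bert.embeddings.LayerNorm.weight", [none, none]),
     ("bert.embeddings.LayerNorm.bias", [none])]
    ++ (PySem.List.pyRange 0 num_layers 1).map (fun i => ("bert.encoder.layer." ++ PySem.Int.toStr i ++ ".attention.self.query.weight", [none, none]))
    ++ (PySem.List.pyRange 0 num_layers 1).map (fun i => ("bert.encoder.layer." ++ PySem.Int.toStr i ++ ".attention.self.query.bias", [none]))
    ++ (PySem.List.pyRange 0 num_layers 1).map (fun i => ("bert.encoder.layer." ++ PySem.Int.toStr i ++ ".attention.self.key.weight", [none, none]))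
    ++ (PySem.List.pyRange 0 num_layers 1).map (fun i => ("bert.encoder.layer." ++ PySem.Int.toStr i ++ ".attention.self.key.bias", [none]))
    ++ (PySem.List.pyRange 0 num_layers 1).map (fun i => ("bert.encoder.layer." ++ PySem.Int.toStr i ++ ".attention.self.value.weight", [none, none]))
    ++ (PySem.List.pyRange 0 num_layers 1).map (fun i => ("bert.encoder.layer." ++ PySem.Int.toStr i ++ ".attention.self.value.bias", [none]))
    ++ (PySem.List.pyRange 0 num_layers 1).map (fun i => ("bert.encoder.layer." ++ PySem.Int.toStr i ++ ".attention.output.dense.weight", [none, none]))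
    ++ (PySem.List.pyRange 0 num_layers 1).map (fun i => ("bert.encoder.layer." ++ PySem.Int.toStr i ++ ".attention.output.dense.bias", [none]))
    ++ (PySem.List.pyRange 0 num_layers 1).map (fun i => ("bert.encoder.layer." ++ PySem.Int.toStr i ++ ".attention.output.LayerNorm.weight", [none, none]))
    ++ (PySem.List.pyRange 0 num_layers 1).map (fun i => ("bert.encoder.layer." ++ PySem.Int.toStr i ++ ".attention.output.LayerNorm.bias", [none]))
    ++ (PySem.List.pyRange 0 num_layers cross_attention_freq).map (fun i => ("bert.encoder.layer." ++ PySem.Int.toStr i ++ ".crossattention.self.query.weight", [none, none]))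
    ++ (PySem.List.pyRange 0 num_layers cross_attention_freq).map (fun i => ("bert.encoder.layer." ++ PySem.Int.toStr i ++ ".crossattention.self.query.bias", [none]))
    ++ (PySem.List.pyRange 0 num_layers cross_attention_freq).map (fun i => ("bert.encoder.layer." ++ PySem.Int.toStr i ++ ".crossattention.self.key.weight", [none, some "P_vit_res"]))
    ++ (PySem.List.pyRange 0 num_layers cross_attention_freq).map (fun i => ("bert.encoder.layer." ++ PySem.Int.toStr i ++ ".crossattention.self.key.bias", [none]))
    ++ (PySem.List.pyRange 0 num_layers cross_attention_freq).map (fun i => ("bert.encoder.layer." ++ PySem.Int.toStr i ++ ".crossattention.self.value.weight", [none, some "P_vit_res"]))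
    ++ (PySem.List.pyRange 0 num_layers cross_attention_freq).map (fun i => ("bert.encoder.layer." ++ PySem.Int.toStr i ++ ".crossattention.self.value.bias", [none]))
    ++ (PySem.List.pyRange 0 num_layers cross_attention_freq).map (fun i => ("bert.encoder.layer." ++ PySem.Int.toStr i ++ ".crossattention.output.dense.weight", [none, none]))
    ++ (PySem.List.pyRange 0 num_layers cross_attention_freq).map (fun i => ("bert.encoder.layer." ++ PySem.Int.toStr i ++ ".crossattention.output.dense.bias", [none]))
    ++ (PySem.List.pyRange 0 num_layers cross_attention_freq).map (fun i => ("bert.encoder.layer." ++ PySem.Int.toStr i ++ ".crossattention.output.LayerNorm.weight", [none, none]))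
    ++ (PySem.List.pyRange 0 num_layers cross_attention_freq).map (fun i => ("bert.encoder.layer." ++ PySem.Int.toStr i ++ ".crossattention.output.LayerNorm.bias", [none]))
    ++ (PySem.List.pyRange 0 num_layers 1).map (fun i => ("bert.encoder.layer." ++ PySem.Int.toStr i ++ ".intermediate_query.dense.weight", [none, none]))
    ++ (PySem.List.pyRange 0 num_layers 1).map (fun i => ("bert.encoder.layer." ++ PySem.Int.toStr i ++ ".intermediate_query.dense.bias", [none]))
    ++ (PySem.List.pyRange 0 num_layers 1).map (fun i => ("bert.encoder.layer." ++ PySem.Int.toStr i ++ ".output_query.dense.weight", [none, none]))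
    ++ (PySem.List.pyRange 0 num_layers 1).map (fun i => ("bert.encoder.layer." ++ PySem.Int.toStr i ++ ".output_query.dense.bias", [none]))
    ++ (PySem.List.pyRange 0 num_layers 1).map (fun i => ("bert.encoder.layer." ++ PySem.Int.toStr i ++ ".output_query.LayerNorm.weight", [none, none]))
    ++ (PySem.List.pyRange 0 num_layers 1).map (fun i => ("bert.encoder.layer." ++ PySem.Int.toStr i ++ ".output_query.LayerNorm.bias", [none])))).items

-- ===== PORT B =====
-- B's data: the shared attention module names; everything else is computed and classified on the fly.
def pvAttnModules : List String := ["self.query", "self.key", "self.value", "output.dense", "output.LayerNorm"]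

def get_qformer_ps_alt (num_layers : Int) (cross_attention_freq : Int) : List (String × List (Option String)) :=
  let ps0 : PySem.Dict String (List (Option String)) := PySem.Dict.ofList
    [("bert.embeddings.position_ids", [none, none]),
     ("bert.embeddings.LayerNorm.weight", [none, none]),
     ("bert.embeddings.LayerNorm.bias", [none])]
  let groups : List (String × List String × Int) :=
    [("attention", pvAttnModules, 1),
     ("crossattention", pvAttnModules, cross_attention_freq),
     ("", ["intermediate_query.dense", "output_query.dense", "output_query.LayerNorm"], 1)]
  (groups.foldl (fun d g =>
    g.2.1.foldl (fun d module =>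
      let name := if g.1 ≠ "" then g.1 ++ "." ++ module else module
      (["weight", "bias"] : List String).foldl (fun d kind =>
        let shape : List (Option String) :=
          if kind = "bias" then [none]
          else if g.1 = "crossattention" ∧ (module = "self.key" ∨ module = "self.value") then [none, some "P_vit_res"]
          else [none, none]
        (PySem.List.pyRange 0 num_layers g.2.2).foldl
          (fun d i => d.insert ("bert.encoder.layer." ++ PySem.Int.toStr i ++ "." ++ name ++ "." ++ kind) shape) d) d) d) ps0).items

-- ===== PRECONDITION & SPEC =====
-- Pre_ excludes only cross_attention_freq = 0, where Python's range(0, n, 0) raises ValueError in A (and in B).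
def Pre_get_qformer_ps (num_layers : Int) (cross_attention_freq : Int) : Prop := cross_attention_freq ≠ 0
instance (num_layers : Int) (cross_attention_freq : Int) : Decidable (Pre_get_qformer_ps num_layers cross_attention_freq) := by unfold Pre_get_qformer_ps; infer_instance
def pvWitness_get_qformer_ps : Int × Int := (12, 2)
def Spec_get_qformer_ps (num_layers : Int) (cross_attention_freq : Int) (out : List (String × List (Option String))) : Prop := out = get_qformer_ps_alt num_layers cross_attention_freq
instance (num_layers : Int) (cross_attention_freq : Int) (out : List (String × List (Option String))) : Decidable (Spec_get_qformer_ps num_layers cross_attention_freq out) := by unfold Spec_get_qformer_ps; infer_instance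

-- ===== CLAIM (what is proved, stated in full; the proofs are below) =====
def Claim_equal_get_qformer_ps : Prop := ∀ (num_layers : Int) (cross_attention_freq : Int), Dom_get_qformer_ps num_layers cross_attention_freq → Pre_get_qformer_ps num_layers cross_attention_freq → Spec_get_qformer_ps num_layers cross_attention_freq (get_qformer_ps num_layers cross_attention_freq)

-- ===== LEMMAS AND PROOFS =====

-- ===== VERDICT (by name: the statement is the Claim_ definition above) =====
theorem get_qformer_ps_spec : Claim_equal_get_qformer_ps := by
  intro n f _ _
  unfold Spec_get_qformer_ps get_qformer_ps get_qformer_ps_alt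
  simp only [PySem.Dict.ofList, PySem.Dict.update, pvAttnModules,
    List.foldl_cons, List.foldl_nil, List.foldl_append, List.foldl_map,
    String.append_assoc]
  rfl
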